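-- pv_equiv track=rewrite | github.com/techeer-sv/coteto | kihong/week2/hard.py | solution
-- ===== SOURCE A (Python) =====
-- def solution(s):
--
--     n = len(s)
--
--     result = 0
--     for start in range(n):
--         for end in range(start + 1, n):
--             if s[start] != s[end]:
--                 result += end - start
--             else:
--                 s_part = s[start : end + 1]
--                 max_n = 0
--                 # 각 문장열 분석
--                 set_s = set(s_part)
--
--                 # reverse String 제작
--                 reverse_str = list(s_part)
--                 reverse_str.reverse()
--                 reverse_str = "".join(reverse_str)
--
--                 # 각 문자열에 대해서 큰 원소와 작은 원소 분석
--                 dict_s = {}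
--                 for i in set_s:
--                     dict_s[i] = [s_part.find(i), len(s_part) - reverse_str.find(i) - 1]
--
--                 # 각 원소에 대해서 큰 값 분석
--                 for item, value in dict_s.items():
--                     for t_item, t_value in dict_s.items():
--                         if item == t_item:
--                             continue
--                         max_n = max(
--                             max_n,
--                             abs(value[0] - t_value[1]),
--                             abs(value[1] - t_value[0]),
--                         )
--                 result += max_n
--
--     return result
-- ===== SOURCE B (Python) =====
-- def solution(s):
--     # One pass per start: maintain first/last index past start whose char differs
--     # from s[start]; each pair's contribution is then O(1).
--     n = len(s)
--     result = 0
--     for start in range(n):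
--         c = s[start]
--         first_ne = -1
--         last_ne = -1
--         for end in range(start + 1, n):
--             if s[end] != c:
--                 if first_ne < 0:
--                     first_ne = end
--                 last_ne = end
--                 result += end - start
--             else:
--                 if first_ne >= 0:
--                     result += max(end - first_ne, last_ne - start)
--     return result
-- ===== Notes on version B (the rewrite author's own statement) =====
-- stated objective: faster
-- what changed: A rebuilds each equal-endpoint substring, its char set, its reversed copy and a first/last-occurrence dict and maximizes over all char pairs; B keeps, per start index, two running accumulators (first and last index past start whose char differs from s[start]) so every pair (start, end) contributes in O(1).
import Mathlib
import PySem

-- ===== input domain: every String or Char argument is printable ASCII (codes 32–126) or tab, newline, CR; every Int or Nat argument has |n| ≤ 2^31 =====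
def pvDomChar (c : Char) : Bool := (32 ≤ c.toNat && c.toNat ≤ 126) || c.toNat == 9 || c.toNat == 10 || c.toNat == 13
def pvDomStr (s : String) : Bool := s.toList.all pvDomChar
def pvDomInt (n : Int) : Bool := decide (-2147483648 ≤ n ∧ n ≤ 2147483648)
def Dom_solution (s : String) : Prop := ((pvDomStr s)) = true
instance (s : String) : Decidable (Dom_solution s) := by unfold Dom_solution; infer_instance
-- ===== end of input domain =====

-- B replaces A's per-pair substring/set/dict analysis by two running "first/last
-- differing index" accumulators per start, making each pair O(1) (objective: faster).

-- ===== PORT A =====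
-- the body of A's equal-endpoint branch: s_part analysis via set / reversed string / dict
-- (the Python 2-element list value [first, last] is ported as the pair (first, last))
def solutionStepEq (s_part : List Char) : Int :=
  let set_s : PySem.Set Char := PySem.Set.ofList s_part
  let reverse_str : List Char := s_part.reverse
  let dict_s : PySem.Dict Char (Int × Int) :=
    set_s.foldl (fun d i =>
      d.insert i (PySem.Chars.find s_part [i],
                  (s_part.length : Int) - PySem.Chars.find reverse_str [i] - 1))
      PySem.Dict.empty
  dict_s.items.foldl (fun max_n iv =>
    dict_s.items.foldl (fun max_n tv =>
      if iv.1 = tv.1 then max_n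
      else max (max max_n |iv.2.1 - tv.2.2|) |iv.2.2 - tv.2.1|) max_n) 0

-- A's inner loop 'for end in range(start+1, n)'
def pvAinner (cs : List Char) (start : Nat) (ends : List Nat) (r : Int) : Int :=
  ends.foldl (fun result end_ =>
    if cs.getD start default ≠ cs.getD end_ default then
      result + ((end_ : Int) - (start : Int))
    else
      result + solutionStepEq (PySem.List.slice cs (some (start : Int)) (some ((end_ : Int) + 1)))) r

def solution (s : String) : Int :=
  let cs := s.toList
  let n := cs.length
  (List.range n).foldl (fun result start =>
    pvAinner cs start (List.range' (start + 1) (n - (start + 1))) result) 0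

-- ===== PORT B =====
-- B's inner loop: state (first_ne, last_ne, result), sentinel -1
def pvBinner (cs : List Char) (start : Nat) (c : Char) (ends : List Nat)
    (st : Int × Int × Int) : Int × Int × Int :=
  ends.foldl (fun st end_ =>
    if cs.getD end_ default ≠ c then
      ((if st.1 < 0 then ((end_ : Int)) else st.1), (end_ : Int),
        st.2.2 + ((end_ : Int) - (start : Int)))
    else if 0 ≤ st.1 then
      (st.1, st.2.1, st.2.2 + max ((end_ : Int) - st.1) (st.2.1 - (start : Int)))
    else st) st

def solution_alt (s : String) : Int :=
  let cs := s.toList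
  let n := cs.length
  (List.range n).foldl (fun result start =>
    let c := cs.getD start default
    (pvBinner cs start c (List.range' (start + 1) (n - (start + 1))) (-1, -1, result)).2.2) 0

-- ===== PRECONDITION & SPEC =====
def Spec_solution (s : String) (out : Int) : Prop := out = solution_alt s
instance (s : String) (out : Int) : Decidable (Spec_solution s out) := by unfold Spec_solution; infer_instance

-- ===== CLAIM (what is proved, stated in full; the proofs are below) =====
def Claim_equal_solution : Prop := ∀ (s : String), Dom_solution s → Spec_solution s (solution s)

-- ===== LEMMAS AND PROOFS =====

-- [x] is a prefix exactly when x is the head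
theorem pv_singleton_prefix (x : Char) (l : List Char) : [x] <+: l ↔ l.head? = some x := by
  constructor
  · rintro ⟨t, rfl⟩; rfl
  · intro h; cases l with
    | nil => simp at h
    | cons a t => simp at h; subst h; exact ⟨t, rfl⟩

-- s_part.find(x) for x ∈ s_part: the FIRST index holding x
theorem pv_find_singleton (t : List Char) (x : Char) (h : x ∈ t) :
    ∃ p : Nat, PySem.Chars.find t [x] = (p : Int) ∧ p < t.length ∧ t[p]? = some x ∧
      ∀ i < p, t[i]? ≠ some x := by
  have hinf : [x] <:+: t := (List.singleton_infix_iff x t).mpr h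
  have h0 : 0 ≤ PySem.Chars.find t [x] := (PySem.Chars.find_nonneg_iff t [x]).mpr hinf
  obtain ⟨hpre, hmin⟩ := PySem.Chars.find_spec h0
  refine ⟨(PySem.Chars.find t [x]).toNat, (Int.toNat_of_nonneg h0).symm, ?_, ?_, ?_⟩
  · by_contra hge
    push Not at hge
    rw [List.drop_eq_nil_of_le hge] at hpre
    simp at hpre
  · rw [← List.head?_drop]
    exact (pv_singleton_prefix x _).mp hpre
  · intro i hi hval
    exact hmin i hi ((pv_singleton_prefix x _).mpr (by rw [List.head?_drop]; exact hval))

-- len - reversed.find(x) - 1 for x ∈ s_part: the LAST index holding x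
theorem pv_last_singleton (t : List Char) (x : Char) (h : x ∈ t) :
    ∃ q : Nat, (t.length : Int) - PySem.Chars.find t.reverse [x] - 1 = (q : Int) ∧
      q < t.length ∧ t[q]? = some x ∧ ∀ i, q < i → i < t.length → t[i]? ≠ some x := by
  obtain ⟨p, hfind, hp, hval, hmin⟩ := pv_find_singleton t.reverse x (List.mem_reverse.mpr h)
  rw [List.length_reverse] at hp
  have hrev : ∀ j, j < t.length → t.reverse[j]? = t[t.length - 1 - j]? := by
    intro j hj
    rw [List.getElem?_reverse hj, Nat.sub_sub]
  refine ⟨t.length - 1 - p, ?_, by omega, ?_, ?_⟩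
  · rw [hfind]; omega
  · rw [← hrev p hp]; exact hval
  · intro i hqi hi hvi
    have hj : t.length - 1 - i < p := by omega
    refine hmin _ hj ?_
    rw [hrev _ (by omega), show t.length - 1 - (t.length - 1 - i) = i by omega]
    exact hvi

-- the double fold over dict items, abstracted
def pvStep (p q : Char × Int × Int) (acc : Int) : Int :=
  if p.1 = q.1 then acc else max (max acc |p.2.1 - q.2.2|) |p.2.2 - q.2.1|

def pvInner (l : List (Char × Int × Int)) (p : Char × Int × Int) (a : Int) : Int :=
  l.foldl (fun acc q => pvStep p q acc) a

def pvOuter (l l' : List (Char × Int × Int)) (a : Int) : Int :=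
  l.foldl (fun acc p => pvInner l' p acc) a

theorem pvStep_mono (p q a) : a ≤ pvStep p q a := by
  unfold pvStep; split
  · exact le_refl a
  · exact le_trans (le_max_left a _) (le_max_left _ _)

theorem pvInner_mono (l p a) : a ≤ pvInner l p a := by
  induction l generalizing a with
  | nil => exact le_refl a
  | cons q t ih =>
    simp only [pvInner, List.foldl_cons] at *
    exact le_trans (pvStep_mono p q a) (ih _)

theorem pvInner_le (l p a T) (ha : a ≤ T)
    (h : ∀ q ∈ l, p.1 ≠ q.1 → |p.2.1 - q.2.2| ≤ T ∧ |p.2.2 - q.2.1| ≤ T) :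
    pvInner l p a ≤ T := by
  induction l generalizing a with
  | nil => exact ha
  | cons q t ih =>
    simp only [pvInner, List.foldl_cons] at *
    refine ih _ ?_ (fun q' hq' => h q' (List.mem_cons_of_mem _ hq'))
    unfold pvStep; split
    · exact ha
    · rename_i hne
      obtain ⟨h1, h2⟩ := h q List.mem_cons_self hne
      exact max_le (max_le ha h1) h2

theorem pvInner_ge (l p a) (q) (hq : q ∈ l) (hne : p.1 ≠ q.1) :
    |p.2.1 - q.2.2| ≤ pvInner l p a ∧ |p.2.2 - q.2.1| ≤ pvInner l p a := by
  induction l generalizing a with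
  | nil => cases hq
  | cons q' t ih =>
    simp only [pvInner, List.foldl_cons] at *
    rcases List.mem_cons.mp hq with rfl | hq
    · have hstep : pvStep p q a = max (max a |p.2.1 - q.2.2|) |p.2.2 - q.2.1| := by
        unfold pvStep; split
        · exact absurd ‹p.1 = q.1› hne
        · rfl
      constructor
      · exact le_trans (le_trans (le_trans (le_max_right a _) (le_max_left _ _)) hstep.ge)
          (pvInner_mono t p _)
      · exact le_trans (le_trans (le_max_right _ _) hstep.ge) (pvInner_mono t p _)
    · exact ih _ hq

theorem pvOuter_mono (l l' a) : a ≤ pvOuter l l' a := by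
  induction l generalizing a with
  | nil => exact le_refl a
  | cons p t ih =>
    simp only [pvOuter, List.foldl_cons] at *
    exact le_trans (pvInner_mono l' p a) (ih _)

theorem pvOuter_le (l l' a T) (ha : a ≤ T)
    (h : ∀ p ∈ l, ∀ q ∈ l', p.1 ≠ q.1 → |p.2.1 - q.2.2| ≤ T ∧ |p.2.2 - q.2.1| ≤ T) :
    pvOuter l l' a ≤ T := by
  induction l generalizing a with
  | nil => exact ha
  | cons p t ih =>
    simp only [pvOuter, List.foldl_cons] at *
    exact ih _ (pvInner_le l' p a T ha (h p List.mem_cons_self)) (fun p' hp' => h p' (List.mem_cons_of_mem _ hp'))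

theorem pvOuter_ge (l l' a) (p q) (hp : p ∈ l) (hq : q ∈ l') (hne : p.1 ≠ q.1) :
    |p.2.1 - q.2.2| ≤ pvOuter l l' a ∧ |p.2.2 - q.2.1| ≤ pvOuter l l' a := by
  induction l generalizing a with
  | nil => cases hp
  | cons p' t ih =>
    simp only [pvOuter, List.foldl_cons] at *
    rcases List.mem_cons.mp hp with rfl | hp
    · obtain ⟨h1, h2⟩ := pvInner_ge l' p a q hq hne
      exact ⟨le_trans h1 (pvOuter_mono t l' _), le_trans h2 (pvOuter_mono t l' _)⟩
    · exact ih _ hp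

theorem pvInner_const (l : List (Char × Int × Int)) (p : Char × Int × Int) (a : Int)
    (h : ∀ q ∈ l, p.1 = q.1) : pvInner l p a = a := by
  induction l generalizing a with
  | nil => rfl
  | cons q t ih =>
    simp only [pvInner, List.foldl_cons] at *
    rw [show pvStep p q a = a by unfold pvStep; rw [if_pos (h q List.mem_cons_self)]]
    exact ih _ (fun q' hq' => h q' (List.mem_cons_of_mem _ hq'))

theorem pvOuter_const (l l' : List (Char × Int × Int)) (a : Int)
    (h : ∀ p ∈ l, ∀ q ∈ l', p.1 = q.1) : pvOuter l l' a = a := by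
  induction l generalizing a with
  | nil => rfl
  | cons p t ih =>
    simp only [pvOuter, List.foldl_cons] at *
    rw [pvInner_const l' p a (h p List.mem_cons_self)]
    exact ih _ (fun p' hp' => h p' (List.mem_cons_of_mem _ hp'))

-- the dict's items list
theorem pv_items (t : List Char) :
    (((PySem.Set.ofList t : PySem.Set Char)).foldl (fun d i =>
        d.insert i (PySem.Chars.find t [i],
                    (t.length : Int) - PySem.Chars.find t.reverse [i] - 1))
      PySem.Dict.empty).items =
    (PySem.Set.ofList t).map (fun x => (x, PySem.Chars.find t [x],
        (t.length : Int) - PySem.Chars.find t.reverse [x] - 1)) := by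
  have := PySem.Dict.items_foldl_insert_fresh (PySem.Set.ofList t) (fun x => x)
    (fun x => (PySem.Chars.find t [x], (t.length : Int) - PySem.Chars.find t.reverse [x] - 1))
    PySem.Dict.empty (fun a _ => PySem.Dict.contains_empty a)
    (by simp [PySem.Set.nodup_ofList t])
  simpa using this

-- solutionStepEq is the abstract double max-fold over the dict's items
theorem pv_stepEq_eq_pvOuter (t : List Char) :
    solutionStepEq t = pvOuter ((PySem.Set.ofList t).map (fun x => (x, PySem.Chars.find t [x],
        (t.length : Int) - PySem.Chars.find t.reverse [x] - 1))) ((PySem.Set.ofList t).map (fun x => (x, PySem.Chars.find t [x],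
        (t.length : Int) - PySem.Chars.find t.reverse [x] - 1))) 0 := by
  rw [← pv_items t]; rfl

-- A's equal-endpoint analysis on an all-equal substring is 0
theorem pv_stepEq_none (t : List Char) (c : Char) (h : ∀ x ∈ t, x = c) :
    solutionStepEq t = 0 := by
  rw [pv_stepEq_eq_pvOuter]
  apply pvOuter_const
  rintro p hp q hq
  obtain ⟨x, hx, rfl⟩ := List.mem_map.mp hp
  obtain ⟨y, hy, rfl⟩ := List.mem_map.mp hq
  have hx' := h x ((PySem.Set.mem_ofList t x).mp hx)
  have hy' := h y ((PySem.Set.mem_ofList t y).mp hy)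
  simp [hx', hy']

-- A's equal-endpoint analysis, characterized by the first/last index differing from c
theorem pv_stepEq_some (t : List Char) (c : Char) (f l : Nat)
    (h0 : t[0]? = some c) (hL : t[t.length - 1]? = some c)
    (hf0 : 0 < f) (hfl : f ≤ l) (hl : l < t.length - 1)
    (hfne : t[f]? ≠ some c) (hlne : t[l]? ≠ some c)
    (hmin : ∀ i, 0 < i → i < f → t[i]? = some c)
    (hmax : ∀ i, l < i → i < t.length - 1 → t[i]? = some c) :
    solutionStepEq t = max ((t.length : Int) - 1 - (f : Int)) (l : Int) := by
  have hfL : f < t.length := by omega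
  have hlL : l < t.length := by omega
  -- any index holding a char ≠ c lies in [f, l]
  have hne_bounds : ∀ z, z < t.length → t[z]? ≠ some c → f ≤ z ∧ z ≤ l := by
    intro z hz hnec
    constructor
    · by_contra hlt; push Not at hlt
      rcases Nat.eq_zero_or_pos z with rfl | hz0
      · exact hnec h0
      · exact hnec (hmin z hz0 hlt)
    · by_contra hgt; push Not at hgt
      rcases Nat.lt_or_ge z (t.length - 1) with hzl | hzl
      · exact hnec (hmax z hgt hzl)
      · rw [show z = t.length - 1 by omega] at hnec
        exact hnec hL
  -- indices holding different chars are at distance ≤ max (L-1-f) l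
  have comb : ∀ a b : Nat, a < t.length → b < t.length → t[a]? ≠ t[b]? →
      |(a : Int) - (b : Int)| ≤ max ((t.length : Int) - 1 - (f : Int)) (l : Int) := by
    intro a b ha hb hab
    by_cases hac : t[a]? = some c
    · have hbc : t[b]? ≠ some c := fun hbc => hab (hac.trans hbc.symm)
      obtain ⟨hbf, hbl⟩ := hne_bounds b hb hbc
      rcases Nat.lt_or_ge b a with hlt | hle
      · rw [abs_of_nonneg (by omega)]
        exact le_trans (by omega) (le_max_left _ _)
      · rw [abs_sub_comm, abs_of_nonneg (by omega)]
        exact le_trans (by omega) (le_max_right _ _)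
    · obtain ⟨haf, hal⟩ := hne_bounds a ha hac
      rcases Nat.lt_or_ge b a with hlt | hle
      · rw [abs_of_nonneg (by omega)]
        exact le_trans (by omega) (le_max_right _ _)
      · rw [abs_sub_comm, abs_of_nonneg (by omega)]
        exact le_trans (by omega) (le_max_left _ _)
  rw [pv_stepEq_eq_pvOuter]
  apply le_antisymm
  · apply pvOuter_le
    · exact le_trans (by omega : (0 : Int) ≤ (t.length : Int) - 1 - (f : Int)) (le_max_left _ _)
    · rintro p hp q hq hne1
      obtain ⟨x, hx, rfl⟩ := List.mem_map.mp hp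
      obtain ⟨y, hy, rfl⟩ := List.mem_map.mp hq
      simp only at hne1
      have hx' : x ∈ t := (PySem.Set.mem_ofList t x).mp hx
      have hy' : y ∈ t := (PySem.Set.mem_ofList t y).mp hy
      obtain ⟨px, hpx_eq, hpx_lt, hpx_val, _⟩ := pv_find_singleton t x hx'
      obtain ⟨qx, hqx_eq, hqx_lt, hqx_val, _⟩ := pv_last_singleton t x hx'
      obtain ⟨py, hpy_eq, hpy_lt, hpy_val, _⟩ := pv_find_singleton t y hy'
      obtain ⟨qy, hqy_eq, hqy_lt, hqy_val, _⟩ := pv_last_singleton t y hy'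
      constructor
      · show |PySem.Chars.find t [x] - ((t.length : Int) - PySem.Chars.find t.reverse [y] - 1)| ≤ _
        rw [hpx_eq, show (t.length : Int) - PySem.Chars.find t.reverse [y] - 1 = (qy : Int) from hqy_eq]
        exact comb px qy hpx_lt hqy_lt (by rw [hpx_val, hqy_val]; simpa using hne1)
      · show |((t.length : Int) - PySem.Chars.find t.reverse [x] - 1) - PySem.Chars.find t [y]| ≤ _
        rw [hpy_eq, show (t.length : Int) - PySem.Chars.find t.reverse [x] - 1 = (qx : Int) from hqx_eq]
        exact comb qx py hqx_lt hpy_lt (by rw [hqx_val, hpy_val]; simpa using hne1)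
  · -- exhibit the two extremal pairs
    have hcmem : c ∈ t := List.mem_of_getElem? h0
    have hfmem : t[f]'hfL ∈ t := List.getElem_mem hfL
    have hlmem : t[l]'hlL ∈ t := List.getElem_mem hlL
    have hxfc : t[f]'hfL ≠ c := fun hh => hfne (by rw [List.getElem?_eq_getElem hfL, hh])
    have hxlc : t[l]'hlL ≠ c := fun hh => hlne (by rw [List.getElem?_eq_getElem hlL, hh])
    obtain ⟨pf, hpf_eq, hpf_lt, hpf_val, hpf_min⟩ := pv_find_singleton t (t[f]'hfL) hfmem
    obtain ⟨qc, hqc_eq, hqc_lt, hqc_val, hqc_max⟩ := pv_last_singleton t c hcmem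
    obtain ⟨pc, hpc_eq, hpc_lt, hpc_val, hpc_min⟩ := pv_find_singleton t c hcmem
    obtain ⟨ql, hql_eq, hql_lt, hql_val, hql_max⟩ := pv_last_singleton t (t[l]'hlL) hlmem
    have hpf_f : pf = f := by
      have h2 : f ≤ pf := (hne_bounds pf hpf_lt
        (by rw [hpf_val]; intro hcon; exact hxfc (Option.some.inj hcon))).1
      rcases lt_trichotomy pf f with hlt | heq | hgt
      · omega
      · exact heq
      · exact absurd (List.getElem?_eq_getElem hfL) (hpf_min f hgt)
    have hqc_L : qc = t.length - 1 := by
      by_contra hne'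
      exact (hqc_max (t.length - 1) (by omega) (by omega)) hL
    have hpc_0 : pc = 0 := by
      rcases Nat.eq_zero_or_pos pc with h | h
      · exact h
      · exact absurd h0 (hpc_min 0 h)
    have hql_l : ql = l := by
      have h2 : ql ≤ l := (hne_bounds ql hql_lt
        (by rw [hql_val]; intro hcon; exact hxlc (Option.some.inj hcon))).2
      rcases lt_trichotomy ql l with hlt | heq | hgt
      · exact absurd (List.getElem?_eq_getElem hlL) (hql_max l hlt hlL)
      · exact heq
      · omega
    have hmemM : ∀ z, z ∈ t → (z, PySem.Chars.find t [z],
        (t.length : Int) - PySem.Chars.find t.reverse [z] - 1) ∈ ((PySem.Set.ofList t).map (fun x => (x, PySem.Chars.find t [x],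
        (t.length : Int) - PySem.Chars.find t.reverse [x] - 1))) := by
      intro z hz
      exact List.mem_map_of_mem ((PySem.Set.mem_ofList t z).mpr hz)
    have c1 := (pvOuter_ge _ _ 0 _ _ (hmemM _ hfmem) (hmemM _ hcmem) hxfc).1
    have c2 := (pvOuter_ge _ _ 0 _ _ (hmemM _ hlmem) (hmemM _ hcmem) hxlc).2
    simp only at c1 c2
    rw [hpf_eq, hpf_f, hqc_eq, hqc_L] at c1
    rw [hql_eq, hql_l, hpc_eq, hpc_0] at c2
    rw [abs_sub_comm, abs_of_nonneg (by omega)] at c1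
    rw [abs_of_nonneg (by omega)] at c2
    apply max_le
    · exact le_trans (by omega) c1
    · exact le_trans (by omega) c2

-- the slice cs[start:end+1], elementwise
theorem pv_slice_getElem (cs : List Char) (start e : Nat) (he : e < cs.length) (hse : start < e) :
    (PySem.List.slice cs (some (start : Int)) (some ((e : Int) + 1))).length = e + 1 - start ∧
    ∀ p < e + 1 - start,
      (PySem.List.slice cs (some (start : Int)) (some ((e : Int) + 1)))[p]? = cs[start + p]? := by
  have hcast : ((e : Int) + 1) = ((e + 1 : Nat) : Int) := by push_cast; ring
  rw [hcast, PySem.List.slice_natCast]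
  constructor
  · simp [List.length_take, List.length_drop]
    omega
  · intro p hp
    rw [List.getElem?_take_of_lt (by omega), List.getElem?_drop]

theorem pv_key_none (cs : List Char) (c : Char) (start e : Nat)
    (he : e < cs.length) (hse : start < e)
    (hc : cs[start]? = some c) (hce : cs[e]? = some c)
    (hmid : ∀ i, start < i → i < e → cs[i]? = some c) :
    solutionStepEq (PySem.List.slice cs (some (start : Int)) (some ((e : Int) + 1))) = 0 := by
  obtain ⟨hlen, hget⟩ := pv_slice_getElem cs start e he hse
  apply pv_stepEq_none _ c
  intro x hx
  obtain ⟨p, hp, hval⟩ := List.getElem_of_mem hx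
  rw [hlen] at hp
  have hx' : cs[start + p]? = some x := by
    rw [← hget p hp, List.getElem?_eq_getElem (by rw [hlen]; exact hp), hval]
  rcases Nat.eq_zero_or_pos p with rfl | hp0
  · rw [Nat.add_zero, hc] at hx'
    exact (Option.some.inj hx').symm
  · rcases Nat.lt_or_ge (start + p) e with hpe | hpe
    · rw [hmid (start + p) (by omega) hpe] at hx'
      exact (Option.some.inj hx').symm
    · rw [show start + p = e by omega, hce] at hx'
      exact (Option.some.inj hx').symm

theorem pv_key_some (cs : List Char) (c : Char) (start e f l : Nat)
    (he : e < cs.length) (hse : start < e)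
    (hc : cs[start]? = some c) (hce : cs[e]? = some c)
    (hf : start < f) (hfl : f ≤ l) (hl : l < e)
    (hfne : cs[f]? ≠ some c) (hlne : cs[l]? ≠ some c)
    (hmin : ∀ i, start < i → i < f → cs[i]? = some c)
    (hmax : ∀ i, l < i → i < e → cs[i]? = some c) :
    solutionStepEq (PySem.List.slice cs (some (start : Int)) (some ((e : Int) + 1))) =
      max ((e : Int) - (f : Int)) ((l : Int) - (start : Int)) := by
  obtain ⟨hlen, hget⟩ := pv_slice_getElem cs start e he hse
  set t := PySem.List.slice cs (some (start : Int)) (some ((e : Int) + 1)) with ht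
  have hstep := pv_stepEq_some t c (f - start) (l - start)
    (by rw [hget 0 (by omega), Nat.add_zero]; exact hc)
    (by rw [hlen, hget (e + 1 - start - 1) (by omega), show start + (e + 1 - start - 1) = e by omega]
        exact hce)
    (by omega) (by omega) (by rw [hlen]; omega)
    (by rw [hget (f - start) (by omega), show start + (f - start) = f by omega]; exact hfne)
    (by rw [hget (l - start) (by omega), show start + (l - start) = l by omega]; exact hlne)
    (by intro i hi0 hif
        rw [hget i (by omega), hmin (start + i) (by omega) (by omega)])
    (by intro i hli hiL
        rw [hlen] at hiL
        rw [hget i (by omega), hmax (start + i) (by omega) (by omega)])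
  rw [hstep, hlen]
  congr 1 <;> omega

-- B's loop invariant: first_ne/last_ne describe the first/last index in (start, start+k] differing from c
def pvInv (cs : List Char) (c : Char) (start : Nat) (fne lne : Int) (k : Nat) : Prop :=
  (fne = -1 ∧ lne = -1 ∧ ∀ i, start < i → i ≤ start + k → cs[i]? = some c)
  ∨ (∃ f l : Nat, fne = (f : Int) ∧ lne = (l : Int) ∧ start < f ∧ f ≤ l ∧ l ≤ start + k ∧
      cs[f]? ≠ some c ∧ cs[l]? ≠ some c ∧
      (∀ i, start < i → i < f → cs[i]? = some c) ∧
      (∀ i, l < i → i ≤ start + k → cs[i]? = some c))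

theorem pv_inner_inv (cs : List Char) (start : Nat) (c : Char)
    (hc : cs[start]? = some c) :
    ∀ k, start + k < cs.length → ∀ r : Int,
      (pvBinner cs start c (List.range' (start + 1) k) (-1, -1, r)).2.2 =
        pvAinner cs start (List.range' (start + 1) k) r ∧
      pvInv cs c start (pvBinner cs start c (List.range' (start + 1) k) (-1, -1, r)).1
        (pvBinner cs start c (List.range' (start + 1) k) (-1, -1, r)).2.1 k := by
  intro k
  induction k with
  | zero =>
    intro hk r
    refine ⟨rfl, Or.inl ⟨rfl, rfl, ?_⟩⟩
    intro i h1 h2; omega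
  | succ k ih =>
    intro hk r
    obtain ⟨hB, hInv⟩ := ih (by omega) r
    have hsL : start < cs.length := by omega
    have heL : start + 1 + k < cs.length := by omega
    have hgs : cs.getD start default = c := by
      rw [List.getD_eq_getElem _ _ hsL]
      rw [List.getElem?_eq_getElem hsL] at hc
      exact Option.some.inj hc
    rw [List.range'_1_concat]
    simp only [pvBinner, pvAinner, List.foldl_append, List.foldl_cons, List.foldl_nil]
    rw [show (List.range' (start + 1) k).foldl _ ((-1 : Int), (-1 : Int), r) =
      pvBinner cs start c (List.range' (start + 1) k) (-1, -1, r) from rfl]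
    rw [show (List.range' (start + 1) k).foldl _ r =
      pvAinner cs start (List.range' (start + 1) k) r from rfl]
    set st := pvBinner cs start c (List.range' (start + 1) k) (-1, -1, r) with hst
    by_cases hec : cs[start + 1 + k]? = some c
    · have hgec : cs.getD (start + 1 + k) default = c := by
        rw [List.getD_eq_getElem _ _ heL]
        rw [List.getElem?_eq_getElem heL] at hec
        exact Option.some.inj hec
      rw [if_neg (show ¬(cs.getD (start + 1 + k) default ≠ c) from fun hh => hh hgec)]
      rw [if_neg (show ¬(cs.getD start default ≠ cs.getD (start + 1 + k) default) from
        fun hh => hh (hgs.trans hgec.symm))]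
      rcases hInv with ⟨hf, hl, hall⟩ | ⟨f, l, hf, hl, hsf, hfl, hlk, hfne, hlne, hminp, hmaxp⟩
      · rw [if_neg (show ¬(0 ≤ st.1) by rw [hf]; omega)]
        have hzero := pv_key_none cs c start (start + 1 + k) heL (by omega) hc hec
          (fun i hi1 hi2 => hall i hi1 (by omega))
        refine ⟨by rw [hB, hzero, add_zero], Or.inl ⟨hf, hl, ?_⟩⟩
        intro i h1 h2
        rcases Nat.lt_or_ge i (start + 1 + k) with hlt | hge
        · exact hall i h1 (by omega)
        · rw [show i = start + 1 + k by omega]; exact hec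
      · rw [if_pos (show (0 : Int) ≤ st.1 by rw [hf]; exact Int.natCast_nonneg f)]
        have hkey := pv_key_some cs c start (start + 1 + k) f l heL (by omega) hc hec
          hsf hfl (by omega) hfne hlne hminp (fun i hi1 hi2 => hmaxp i hi1 (by omega))
        refine ⟨?_, ?_⟩
        · show st.2.2 + _ = _
          rw [hB, hkey, hf, hl]
        · refine Or.inr ⟨f, l, hf, hl, hsf, hfl, by omega, hfne, hlne, hminp, ?_⟩
          intro i h1 h2
          rcases Nat.lt_or_ge i (start + 1 + k) with hlt | hge
          · exact hmaxp i h1 (by omega)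
          · rw [show i = start + 1 + k by omega]; exact hec
    · have hgec : cs.getD (start + 1 + k) default ≠ c := by
        rw [List.getD_eq_getElem _ _ heL]
        intro hh
        exact hec (by rw [List.getElem?_eq_getElem heL, hh])
      rw [if_pos hgec]
      rw [if_pos (show cs.getD start default ≠ cs.getD (start + 1 + k) default from
        by rw [hgs]; exact fun hh => hgec hh.symm)]
      refine ⟨?_, ?_⟩
      · show st.2.2 + _ = _
        rw [hB]
      · rcases hInv with ⟨hf, hl, hall⟩ | ⟨f, l, hf, hl, hsf, hfl, hlk, hfne, hlne, hminp, hmaxp⟩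
        · rw [if_pos (show st.1 < 0 by rw [hf]; omega)]
          refine Or.inr ⟨start + 1 + k, start + 1 + k, rfl, rfl,
            by omega, le_refl _, by omega, hec, hec, ?_, ?_⟩
          · intro i h1 h2; exact hall i h1 (by omega)
          · intro i h1 h2; omega
        · rw [if_neg (show ¬(st.1 < 0) by rw [hf]; omega)]
          refine Or.inr ⟨f, start + 1 + k, hf, rfl, hsf, by omega, by omega,
            hfne, hec, hminp, ?_⟩
          intro i h1 h2; omega

-- ===== VERDICT (by name: the statement is the Claim_ definition above) =====
theorem solution_spec : Claim_equal_solution := by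
  intro s _
  unfold Spec_solution solution solution_alt
  apply PySem.List.foldl_congr_mem
  intro r start hstart
  have hsn := List.mem_range.mp hstart
  have hc : s.toList[start]? = some (s.toList.getD start default) := by
    rw [List.getD_eq_getElem _ _ hsn, List.getElem?_eq_getElem hsn]
  exact ((pv_inner_inv s.toList start _ hc (s.toList.length - (start + 1))
    (by omega) r).1).symm
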